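-- pv_equiv track=rewrite | github.com/ScienceComputing/NGSOmics_Programming | WGS/Correct_Base_Count.py | correct_count_base
-- ===== SOURCE A (Python) =====
-- def correct_count_base(input_base):
--     base_count = {}
--
--     k = 0
--     while k < len(input_base):
--         base = input_base[k]
--         k += 1
--         count = ''
--         while k < len(input_base) and input_base[k].isdigit():
--             count += input_base[k]
--             k += 1
--         count = int(count) if count else 1
--         base_count[base] = base_count.get(base, 0) + count
--
--     compressed_string = ''.join([f'{base}:{count} ' for base, count in sorted(base_count.items())])
--     return compressed_string
-- ===== SOURCE B (Python) =====
-- def correct_count_base(input_base):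
--     counts = {}
--     cur = None
--     digits = ''
--     for ch in input_base:
--         if cur is not None and ch.isdigit():
--             digits += ch
--         else:
--             if cur is not None:
--                 counts[cur] = counts.get(cur, 0) + (int(digits) if digits else 1)
--             cur, digits = ch, ''
--     if cur is not None:
--         counts[cur] = counts.get(cur, 0) + (int(digits) if digits else 1)
--     return ''.join(f'{base}:{count} ' for base, count in sorted(counts.items()))
-- ===== Notes on version B (the rewrite author's own statement) =====
-- stated objective: alternative
-- what changed: Replaces A's index-based outer while with a nested digit-consuming inner while by a single for-each pass over the characters that runs a state machine (pending base + pending digit string, flushed when a new token starts and once at the end).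
import Mathlib
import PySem

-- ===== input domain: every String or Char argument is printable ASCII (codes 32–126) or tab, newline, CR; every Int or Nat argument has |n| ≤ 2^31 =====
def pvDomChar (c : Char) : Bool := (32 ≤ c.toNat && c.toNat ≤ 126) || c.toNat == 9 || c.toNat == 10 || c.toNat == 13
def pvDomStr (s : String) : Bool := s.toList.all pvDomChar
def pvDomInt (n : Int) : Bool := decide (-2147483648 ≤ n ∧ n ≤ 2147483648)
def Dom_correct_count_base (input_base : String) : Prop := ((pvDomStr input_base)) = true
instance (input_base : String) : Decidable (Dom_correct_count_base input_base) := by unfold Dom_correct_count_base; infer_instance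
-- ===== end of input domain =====

-- B replaces A's index-driven nested while loops by a single for-each state-machine pass (alternative decomposition, same cost).
-- Shared subexpressions of BOTH Python sources (verbatim in each):
--   'int(digits) if digits else 1'  (int() = PySem.Int.ofChars?; the argument is a digit string, so int() never raises and getD 0 is never taken)
def pvCnt (digs : List Char) : Int :=
  if digs = [] then 1 else (PySem.Int.ofChars? digs).getD 0
--   'base_count[base] = base_count.get(base, 0) + count'
def pvIns (d : PySem.Dict Char Int) (b : Char) (digs : List Char) : PySem.Dict Char Int :=
  d.insert b (d.getD b 0 + pvCnt digs)
--   ''.join(f'{base}:{count} ' for base, count in sorted(dict.items())) — keys are distinct single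
--   characters, so Python's tuple sort of the items is exactly a sort by the (Char) key.
def pvRender (d : PySem.Dict Char Int) : String :=
  PySem.Str.join "" ((PySem.List.sorted d.items (fun p => p.1) false).map
    (fun p => String.mk (p.1 :: ':' :: (PySem.Int.toChars p.2 ++ [' ']))))

-- ===== PORT A =====
-- inner while: consume digits at the cursor, accumulating them onto `count`
def pvADigits (cs : List Char) (count : List Char) : List Char × List Char :=
  match cs with
  | [] => (count, [])
  | c :: rest => if PySem.Chars.isdigit c then pvADigits rest (count ++ [c]) else (count, c :: rest)

theorem pvADigits_len (cs count : List Char) : (pvADigits cs count).2.length ≤ cs.length := by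
  induction cs generalizing count with
  | nil => simp [pvADigits]
  | cons c rest ih =>
    simp only [pvADigits]
    split
    · exact le_trans (ih _) (Nat.le_succ _)
    · simp

-- outer while: read a base char, run the inner while, update the dict
def pvALoop (cs : List Char) (d : PySem.Dict Char Int) : PySem.Dict Char Int :=
  match cs with
  | [] => d
  | c :: rest => pvALoop (pvADigits rest []).2 (pvIns d c (pvADigits rest []).1)
termination_by cs.length
decreasing_by exact Nat.lt_succ_of_le (pvADigits_len rest [])

def correct_count_base (input_base : String) : String :=
  pvRender (pvALoop input_base.toList PySem.Dict.empty)

-- ===== PORT B =====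
-- loop body of B's single for-each pass: state = (counts, cur, digits)
def pvBStep (st : PySem.Dict Char Int × Option Char × List Char) (ch : Char) :
    PySem.Dict Char Int × Option Char × List Char :=
  match st with
  | (d, cur, digits) =>
    if cur.isSome && PySem.Chars.isdigit ch then (d, cur, digits ++ [ch])
    else ((match cur with | some b => pvIns d b digits | none => d), some ch, [])

-- final 'if cur is not None: counts[cur] = …' flush
def pvBFlush (st : PySem.Dict Char Int × Option Char × List Char) : PySem.Dict Char Int :=
  match st with
  | (d, some b, digits) => pvIns d b digits
  | (d, none, _) => d

def correct_count_base_alt (input_base : String) : String :=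
  pvRender (pvBFlush (input_base.toList.foldl pvBStep (PySem.Dict.empty, none, [])))

-- ===== PRECONDITION & SPEC =====
def Spec_correct_count_base (input_base : String) (out : String) : Prop := out = correct_count_base_alt input_base
instance (input_base : String) (out : String) : Decidable (Spec_correct_count_base input_base out) := by unfold Spec_correct_count_base; infer_instance

-- ===== CLAIM (what is proved, stated in full; the proofs are below) =====
def Claim_equal_correct_count_base : Prop := ∀ (input_base : String), Dom_correct_count_base input_base → Spec_correct_count_base input_base (correct_count_base input_base)

-- ===== LEMMAS AND PROOFS =====
-- mid-token invariant: running B's fold from state (d, some b, acc) equals A finishing the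
-- current token (inner while from accumulator acc) and continuing the outer while
theorem pvMid (rest : List Char) : ∀ (d : PySem.Dict Char Int) (b : Char) (acc : List Char),
    pvBFlush (rest.foldl pvBStep (d, some b, acc)) =
      pvALoop (pvADigits rest acc).2 (pvIns d b (pvADigits rest acc).1) := by
  induction rest with
  | nil => intro d b acc; simp [pvADigits, pvBFlush, pvALoop]
  | cons c rest ih =>
    intro d b acc
    by_cases hc : PySem.Chars.isdigit c = true
    · simp only [List.foldl_cons, pvBStep, Option.isSome_some, Bool.true_and, hc, if_pos,
        pvADigits, ih]
    · simp only [List.foldl_cons, pvBStep, Option.isSome_some, Bool.true_and, hc,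
        Bool.false_eq_true, if_neg, not_false_iff, pvADigits, ih]
      rw [pvALoop]

-- A's whole loop equals B's whole pass, for any starting dict
theorem pvLoops (cs : List Char) (d : PySem.Dict Char Int) :
    pvBFlush (cs.foldl pvBStep (d, none, [])) = pvALoop cs d := by
  cases cs with
  | nil => simp [pvBFlush, pvALoop]
  | cons c rest =>
    have h1 : pvBStep (d, none, []) c = (d, some c, []) := by simp [pvBStep]
    rw [List.foldl_cons, h1, pvMid, pvALoop]

-- ===== VERDICT (by name: the statement is the Claim_ definition above) =====
theorem correct_count_base_spec : Claim_equal_correct_count_base := by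
  intro s _
  unfold Spec_correct_count_base correct_count_base correct_count_base_alt
  rw [pvLoops]
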